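-- pv_equiv track=rewrite | github.com/hongii/programmers_python | LV 2/더 맵게.py | solution
-- ===== SOURCE A (Python) =====
-- import heapq
--
-- def solution(scoville, K):
--     heapq.heapify(scoville)
--     cnt = 0
--     while len(scoville) >= 2 and scoville[0] < K:
--         num1 = heapq.heappop(scoville)
--         num2 = heapq.heappop(scoville)
--         heapq.heappush(scoville,(num1 + num2*2))
--         cnt += 1
--
--     return cnt if all(num >= K for num in scoville) else -1
-- ===== SOURCE B (Python) =====
-- def _take(q1, i, q2, j):
--     # pop the smaller front of the two sorted queues (read pointers i into q1, j into q2)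
--     if j == len(q2) or (i < len(q1) and q1[i] <= q2[j]):
--         return q1[i], i + 1, j
--     return q2[j], i, j + 1
--
--
-- def solution(scoville, K):
--     # Two-queue merge technique: q1 = the original foods sorted once; q2 = the newly
--     # mixed foods, appended in FIFO order (their values are nondecreasing, so q2 stays
--     # sorted); the current minimum is always at one of the two fronts. No heap, no
--     # insertion: O(1) per mix after the initial sort. Does not mutate the argument.
--     q1 = sorted(scoville)
--     q2 = []
--     i = j = cnt = 0
--     while (len(q1) - i) + (len(q2) - j) >= 2:
--         front, _, _ = _take(q1, i, q2, j)
--         if front >= K: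
--             break
--         n1, i, j = _take(q1, i, q2, j)
--         n2, i, j = _take(q1, i, q2, j)
--         q2.append(n1 + 2 * n2)
--         cnt += 1
--     rest = q1[i:] + q2[j:]
--     return cnt if all(x >= K for x in rest) else -1
-- ===== Notes on version B (the rewrite author's own statement) =====
-- stated objective: alternative
-- what changed: Replaces the heap entirely with the two-queue merge technique: sort once, keep newly mixed values in a second FIFO queue (they come out nondecreasing, so it stays sorted), and take the minimum from one of the two fronts via read pointers — O(1) per mix after the sort, no heap operations and no insertions; A mutates its argument via heapify while B leaves it untouched (return values proved equal).
import Mathlib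
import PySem

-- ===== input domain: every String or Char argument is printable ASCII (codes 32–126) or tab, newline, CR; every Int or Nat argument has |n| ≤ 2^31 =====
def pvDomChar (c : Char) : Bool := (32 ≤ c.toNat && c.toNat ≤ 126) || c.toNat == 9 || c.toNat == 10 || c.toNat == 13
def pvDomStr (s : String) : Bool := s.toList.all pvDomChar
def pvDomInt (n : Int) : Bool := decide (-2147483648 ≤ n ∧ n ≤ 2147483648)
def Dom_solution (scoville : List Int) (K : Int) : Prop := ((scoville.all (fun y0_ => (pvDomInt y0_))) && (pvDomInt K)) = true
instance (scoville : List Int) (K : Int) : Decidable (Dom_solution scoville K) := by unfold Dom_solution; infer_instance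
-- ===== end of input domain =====

-- B replaces A's binary heap with the two-queue merge technique (sort once; newly mixed
-- values enter a second FIFO queue, whose values stay nondecreasing; the minimum is at
-- one of the two fronts).  A mutates its argument (heapify), B does not: the
-- equivalence proved here is about the RETURN value only.


-- ===== PORT A =====
-- heapq is ported by its exact min-heap contract: after heapify, scoville[0] (the root)
-- is the minimum of the list; heappop returns the minimum and removes one occurrence of
-- it; heappush adds an element to the heap.  The value returned by `solution` depends
-- only on the multiset of heap elements, so this port is exact on every input.

-- used by loopA's termination proof (cited in decreasing_by)
theorem length_erase_min (l : List Int) (h : l ≠ []) :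
    (l.erase ((PySem.List.min? l (fun x => x)).getD 0)).length = l.length - 1 := by
  obtain ⟨m, hm⟩ : ∃ m, PySem.List.min? l (fun x => x) = some m := by
    cases heq : PySem.List.min? l (fun x => x) with
    | none => exact absurd ((PySem.List.min?_eq_none_iff _ _).mp heq) h
    | some m => exact ⟨m, rfl⟩
  rw [hm]
  exact List.length_erase_of_mem (PySem.List.min?_mem hm)

def loopA (scoville : List Int) (K : Int) (cnt : Int) : List Int × Int :=
  if h : 2 ≤ scoville.length ∧ (PySem.List.min? scoville (fun x => x)).getD 0 < K then
    let num1 := (PySem.List.min? scoville (fun x => x)).getD 0      -- heappop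
    let l1 := scoville.erase num1
    let num2 := (PySem.List.min? l1 (fun x => x)).getD 0            -- heappop
    let l2 := l1.erase num2
    loopA (l2 ++ [num1 + num2 * 2]) K (cnt + 1)                     -- heappush
  else (scoville, cnt)
termination_by scoville.length
decreasing_by
  have h2 : 2 ≤ scoville.length := h.1
  have hne : scoville ≠ [] := by intro e; subst e; simp at h2
  have e1 := length_erase_min scoville hne
  have hne1 : scoville.erase ((PySem.List.min? scoville (fun x => x)).getD 0) ≠ [] := by
    intro e; rw [e] at e1; simp at e1; omega
  have e2 := length_erase_min _ hne1
  simp only [List.length_append, List.length_cons, List.length_nil]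
  omega

def solution (scoville : List Int) (K : Int) : Int :=
  if (loopA scoville K 0).1.all (fun num => decide (K ≤ num)) then (loopA scoville K 0).2 else -1

-- ===== PORT B =====
-- _take from Source B: pop the smaller front of the two sorted queues.  Source B keeps read
-- pointers i, j into the Python lists; the port represents "q1 from index i" and
-- "q2 from index j" directly as the lists of remaining elements, so _take returns
-- the popped value and the two remaining lists.
def takeQ (q1 q2 : List Int) : Int × List Int × List Int :=
  match q1, q2 with
  | [], [] => (0, [], [])                                   -- unreachable: callers guarantee ≥ 1 element
  | x :: t, [] => (x, t, [])                                -- j == len(q2): take from q1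
  | [], y :: u => (y, [], u)                                -- q1 exhausted: take from q2
  | x :: t, y :: u => if x ≤ y then (x, t, y :: u) else (y, x :: t, u)

-- used by loopB's termination proof (cited in decreasing_by)
theorem takeQ_length (q1 q2 : List Int) (h : 1 ≤ q1.length + q2.length) :
    (takeQ q1 q2).2.1.length + (takeQ q1 q2).2.2.length + 1 = q1.length + q2.length := by
  match q1, q2 with
  | [], [] => simp at h
  | x :: t, [] => simp [takeQ]
  | [], y :: u => simp [takeQ]
  | x :: t, y :: u => simp only [takeQ]; split <;> simp <;> omega

-- the while loop of Source B: state = (remaining q1, remaining q2, cnt)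
def loopB (q1 q2 : List Int) (K : Int) (cnt : Int) : List Int × List Int × Int :=
  if h : 2 ≤ q1.length + q2.length ∧ (takeQ q1 q2).1 < K then
    let t1 := takeQ q1 q2                                   -- n1, i, j = _take(...)
    let t2 := takeQ t1.2.1 t1.2.2                           -- n2, i, j = _take(...)
    loopB t2.2.1 (t2.2.2 ++ [t1.1 + 2 * t2.1]) K (cnt + 1)  -- q2.append(n1 + 2*n2)
  else (q1, q2, cnt)
termination_by q1.length + q2.length
decreasing_by
  have e1 := takeQ_length q1 q2 (by omega)
  have e2 := takeQ_length (takeQ q1 q2).2.1 (takeQ q1 q2).2.2 (by omega)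
  simp only [List.length_append, List.length_cons, List.length_nil]
  omega

def solution_alt (scoville : List Int) (K : Int) : Int :=
  let r := loopB (PySem.List.sorted scoville (fun x => x) false) [] K 0
  if (r.1 ++ r.2.1).all (fun x => decide (K ≤ x)) then r.2.2 else -1

-- ===== PRECONDITION & SPEC =====
def Spec_solution (scoville : List Int) (K : Int) (out : Int) : Prop := out = solution_alt scoville K
instance (scoville : List Int) (K : Int) (out : Int) : Decidable (Spec_solution scoville K out) := by unfold Spec_solution; infer_instance

-- ===== CLAIM (what is proved, stated in full; the proofs are below) =====
def Claim_equal_solution : Prop := ∀ (scoville : List Int) (K : Int), Dom_solution scoville K → Spec_solution scoville K (solution scoville K)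

-- ===== LEMMAS AND PROOFS =====

-- a value that is a member and a lower bound is THE minimum value
theorem min_eq_of (l : List Int) (m : Int) (h1 : m ∈ l) (h2 : ∀ x ∈ l, m ≤ x) :
    PySem.List.min? l (fun x => x) = some m := by
  obtain ⟨m', hm'⟩ : ∃ m', PySem.List.min? l (fun x => x) = some m' := by
    cases heq : PySem.List.min? l (fun x => x) with
    | none =>
      have := (PySem.List.min?_eq_none_iff _ _).mp heq
      subst this; simp at h1
    | some m' => exact ⟨m', rfl⟩
  have hmem := PySem.List.min?_mem hm'
  have h3 := PySem.List.min?_isMin hm' m h1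
  have h4 := h2 m' hmem
  rw [hm']; congr 1; omega

-- the minimum value is invariant under permutation
theorem min_perm (l l' : List Int) (hp : l.Perm l') :
    PySem.List.min? l (fun x => x) = PySem.List.min? l' (fun x => x) := by
  cases heq : PySem.List.min? l' (fun x => x) with
  | none =>
    have := (PySem.List.min?_eq_none_iff _ _).mp heq
    subst this
    rw [(PySem.List.min?_eq_none_iff _ _).mpr hp.eq_nil]
  | some m =>
    exact min_eq_of l m (hp.mem_iff.mpr (PySem.List.min?_mem heq))
      (fun x hx => PySem.List.min?_isMin heq x (hp.mem_iff.mp hx))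


-- the front taken by takeQ is THE minimum of the two sorted queues
theorem takeQ_min (q1 q2 : List Int) (hs1 : q1.Pairwise (· ≤ ·)) (hs2 : q2.Pairwise (· ≤ ·))
    (h : 1 ≤ q1.length + q2.length) :
    PySem.List.min? (q1 ++ q2) (fun x => x) = some (takeQ q1 q2).1 := by
  match q1, q2 with
  | [], [] => simp at h
  | x :: t, [] =>
    refine min_eq_of _ _ (by simp [takeQ]) ?_
    intro z hz
    simp only [takeQ]
    rcases List.mem_append.mp hz with hz | hz
    · rcases List.mem_cons.mp hz with hz | hz
      · omega
      · exact (List.pairwise_cons.mp hs1).1 z hz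
    · simp at hz
  | [], y :: u =>
    refine min_eq_of _ _ (by simp [takeQ]) ?_
    intro z hz
    simp only [takeQ]
    rcases List.mem_append.mp hz with hz | hz
    · simp at hz
    · rcases List.mem_cons.mp hz with hz | hz
      · omega
      · exact (List.pairwise_cons.mp hs2).1 z hz
  | x :: t, y :: u =>
    have hx := (List.pairwise_cons.mp hs1).1
    have hy := (List.pairwise_cons.mp hs2).1
    simp only [takeQ]
    split
    · rename_i hxy
      refine min_eq_of _ _ (by simp) ?_
      intro z hz
      rcases List.mem_append.mp hz with hz | hz
      · rcases List.mem_cons.mp hz with hz | hz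
        · omega
        · exact hx z hz
      · rcases List.mem_cons.mp hz with hz | hz
        · omega
        · exact le_trans hxy (hy z hz)
    · rename_i hxy
      refine min_eq_of _ _ (by simp) ?_
      intro z hz
      rcases List.mem_append.mp hz with hz | hz
      · rcases List.mem_cons.mp hz with hz | hz
        · omega
        · have := hx z hz; omega
      · rcases List.mem_cons.mp hz with hz | hz
        · omega
        · exact hy z hz

-- the two remainders of takeQ are exactly the concatenation minus the taken value
theorem takeQ_erase (q1 q2 : List Int) (hs1 : q1.Pairwise (· ≤ ·)) :
    (takeQ q1 q2).2.1 ++ (takeQ q1 q2).2.2 = (q1 ++ q2).erase (takeQ q1 q2).1 := by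
  match q1, q2 with
  | [], [] => simp [takeQ]
  | x :: t, [] => simp [takeQ]
  | [], y :: u => simp [takeQ]
  | x :: t, y :: u =>
    have hx := (List.pairwise_cons.mp hs1).1
    simp only [takeQ]
    split
    · simp
    · rename_i hxy
      have hnm : (takeQ (x :: t) (y :: u)).1 ∉ x :: t := by
        simp only [takeQ, if_neg hxy]
        intro hmem
        rcases List.mem_cons.mp hmem with hz | hz
        · omega
        · have := hx y hz; omega
      simp only [takeQ, if_neg hxy] at hnm ⊢
      rw [List.erase_append_right _ hnm, List.erase_cons_head]

theorem takeQ_sorted1 (q1 q2 : List Int) (hs1 : q1.Pairwise (· ≤ ·)) :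
    (takeQ q1 q2).2.1.Pairwise (· ≤ ·) := by
  match q1, q2 with
  | [], [] => simp [takeQ]
  | x :: t, [] => exact (List.pairwise_cons.mp hs1).2
  | [], y :: u => simp [takeQ]
  | x :: t, y :: u =>
    simp only [takeQ]
    split
    · exact (List.pairwise_cons.mp hs1).2
    · exact hs1

theorem takeQ_sorted2 (q1 q2 : List Int) (hs2 : q2.Pairwise (· ≤ ·)) :
    (takeQ q1 q2).2.2.Pairwise (· ≤ ·) := by
  match q1, q2 with
  | [], [] => simp [takeQ]
  | x :: t, [] => simp [takeQ]
  | [], y :: u => exact (List.pairwise_cons.mp hs2).2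
  | x :: t, y :: u =>
    simp only [takeQ]
    split
    · exact hs2
    · exact (List.pairwise_cons.mp hs2).2

theorem takeQ_mem2 (q1 q2 : List Int) (w : Int) (hw : w ∈ (takeQ q1 q2).2.2) : w ∈ q2 := by
  match q1, q2 with
  | [], [] => simp [takeQ] at hw
  | x :: t, [] => simp [takeQ] at hw
  | [], y :: u => simp only [takeQ] at hw; exact List.mem_cons_of_mem _ hw
  | x :: t, y :: u =>
    simp only [takeQ] at hw
    split at hw
    · exact hw
    · exact List.mem_cons_of_mem _ hw

-- loop invariant of B: every element of the mixed queue q2 is at most the value the next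
-- mix would produce (a + 2b for the current two minima a, b), except possibly when q2 is
-- a singleton holding the strict global minimum (which is then popped before appending)
def InvB (q1 q2 : List Int) : Prop :=
  ∀ a b, PySem.List.min? (q1 ++ q2) (fun x => x) = some a →
    PySem.List.min? ((q1 ++ q2).erase a) (fun x => x) = some b →
    ∀ w ∈ q2, w ≤ a + 2 * b ∨ (q2 = [w] ∧ w = a ∧ ∀ x ∈ q1, w < x)

theorem loop_agree (n : Nat) : ∀ (l q1 q2 : List Int) (K cnt : Int),
    l.length ≤ n → l.Perm (q1 ++ q2) →
    q1.Pairwise (· ≤ ·) → q2.Pairwise (· ≤ ·) → InvB q1 q2 →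
    (loopA l K cnt).2 = (loopB q1 q2 K cnt).2.2 ∧
    (loopA l K cnt).1.Perm ((loopB q1 q2 K cnt).1 ++ (loopB q1 q2 K cnt).2.1) := by
  induction n with
  | zero =>
    intro l q1 q2 K cnt hn hp hs1 hs2 hinv
    have hl : l = [] := by cases l with | nil => rfl | cons a t => simp at hn
    subst hl
    rw [loopA, loopB]
    have hlen : (q1 ++ q2).length = 0 := by rw [← hp.length_eq]; rfl
    rw [List.length_append] at hlen
    rw [dif_neg (by intro hc; simp at hc), dif_neg (by intro hc; obtain ⟨hc1, -⟩ := hc; omega)]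
    exact ⟨rfl, hp⟩
  | succ n ih =>
    intro l q1 q2 K cnt hn hp hs1 hs2 hinv
    have hlen : l.length = q1.length + q2.length := by simpa using hp.length_eq
    by_cases h2 : 2 ≤ l.length
    · -- at least two elements: the fronts agree with the heap minimum
      have hmin : PySem.List.min? l (fun x => x) = some (takeQ q1 q2).1 := by
        rw [min_perm l _ hp]
        exact takeQ_min q1 q2 hs1 hs2 (by omega)
      by_cases hK : (takeQ q1 q2).1 < K
      · -- both loops step
        set a := (takeQ q1 q2).1 with ha
        set r1 := (takeQ q1 q2).2.1 with hr1
        set r2 := (takeQ q1 q2).2.2 with hr2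
        have herase1 : r1 ++ r2 = (q1 ++ q2).erase a := takeQ_erase q1 q2 hs1
        have hsr1 : r1.Pairwise (· ≤ ·) := takeQ_sorted1 q1 q2 hs1
        have hsr2 : r2.Pairwise (· ≤ ·) := takeQ_sorted2 q1 q2 hs2
        have hp1 : (l.erase a).Perm (r1 ++ r2) := by
          rw [herase1]; exact hp.erase a
        have hlen1 : r1.length + r2.length + 1 = q1.length + q2.length :=
          takeQ_length q1 q2 (by omega)
        set b := (takeQ r1 r2).1 with hb
        have hmin1 : PySem.List.min? (l.erase a) (fun x => x) = some b := by
          rw [min_perm _ _ hp1]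
          exact takeQ_min r1 r2 hsr1 hsr2 (by omega)
        set s1 := (takeQ r1 r2).2.1 with hs1'
        set s2 := (takeQ r1 r2).2.2 with hs2'
        have herase2 : s1 ++ s2 = (r1 ++ r2).erase b := takeQ_erase r1 r2 hsr1
        have hss1 : s1.Pairwise (· ≤ ·) := takeQ_sorted1 r1 r2 hsr1
        have hss2 : s2.Pairwise (· ≤ ·) := takeQ_sorted2 r1 r2 hsr2
        have hp2 : ((l.erase a).erase b).Perm (s1 ++ s2) := by
          rw [herase2]; exact hp1.erase b
        have hlen2 : s1.length + s2.length + 1 = r1.length + r2.length :=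
          takeQ_length r1 r2 (by omega)
        -- the two minima and basic bounds
        have hamin : ∀ z ∈ q1 ++ q2, a ≤ z := by
          intro z hz
          exact PySem.List.min?_isMin (takeQ_min q1 q2 hs1 hs2 (by omega)) z hz
        have hbmem : b ∈ (q1 ++ q2).erase a := by
          rw [← herase1]
          exact PySem.List.min?_mem (takeQ_min r1 r2 hsr1 hsr2 (by omega))
        have hab : a ≤ b := hamin b (List.mem_of_mem_erase hbmem)
        have hbmin : ∀ z ∈ r1 ++ r2, b ≤ z := by
          intro z hz
          exact PySem.List.min?_isMin (takeQ_min r1 r2 hsr1 hsr2 (by omega)) z hz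
        -- KEY1: every surviving element of the mixed queue is ≤ the new value a + 2b
        have hkey1 : ∀ w ∈ s2, w ≤ a + 2 * b := by
          intro w hw
          have hw2 : w ∈ q2 := takeQ_mem2 q1 q2 w (takeQ_mem2 r1 r2 w hw)
          have hbmin' : b ≤ w := by
            have hw' : w ∈ s1 ++ s2 := List.mem_append_right s1 hw
            rw [herase2] at hw'
            exact hbmin w (List.mem_of_mem_erase hw')
          rcases hinv a b (takeQ_min q1 q2 hs1 hs2 (by omega))
              (by rw [← herase1]; exact takeQ_min r1 r2 hsr1 hsr2 (by omega)) w hw2 with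
            hle | ⟨hq2, hwa, hlt⟩
          · exact hle
          · -- q2 = [w], w = a, a strictly below all of q1: then b ∈ q1, so a < b ≤ w = a
            have hbq1 : b ∈ q1 := by
              rw [hq2, hwa] at hbmem
              have hnm : a ∉ q1 := by
                intro hmem
                have := hlt a hmem
                omega
              rwa [List.erase_append_right _ hnm, List.erase_cons_head,
                List.append_nil] at hbmem
            have := hlt b hbq1
            omega
        -- new mixed queue is sorted
        have hsn2 : (s2 ++ [a + 2 * b]).Pairwise (· ≤ ·) := by
          rw [List.pairwise_append]
          refine ⟨hss2, by simp, ?_⟩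
          intro w hw z hz
          rcases List.mem_singleton.mp hz with rfl
          exact hkey1 w hw
        -- KEY2: the invariant is preserved
        have hinv' : InvB s1 (s2 ++ [a + 2 * b]) := by
          intro a2 b2 hmina2 hminb2 w hw
          have hva2 : a2 ≤ a + 2 * b := by
            refine PySem.List.min?_isMin hmina2 (a + 2 * b) ?_
            simp
          have hmema2 := PySem.List.min?_mem hmina2
          have hmemb2 : b2 ∈ s1 ++ (s2 ++ [a + 2 * b]) :=
            List.mem_of_mem_erase (PySem.List.min?_mem hminb2)
          have ha2b2 : a2 ≤ b2 := PySem.List.min?_isMin hmina2 b2 hmemb2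
          by_cases hbound : a + 2 * b ≤ a2 + 2 * b2
          · left
            rcases List.mem_append.mp hw with hw | hw
            · have := hkey1 w hw; omega
            · rcases List.mem_singleton.mp hw with rfl; omega
          · -- a2 + 2*b2 < a + 2*b: show the singleton alternative
            right
            -- elements of s1 ++ s2 are ≥ b
            have hge : ∀ z, z ∈ s1 ++ s2 → b ≤ z := by
              intro z hz
              refine hbmin z ?_
              rw [herase2] at hz
              exact List.mem_of_mem_erase hz
            -- a2 = a + 2*b
            have ha2v : a2 = a + 2 * b := by
              by_contra hne
              have ha2mem : a2 ∈ s1 ++ s2 := by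
                rcases List.mem_append.mp hmema2 with hz | hz
                · exact List.mem_append_left _ hz
                · rcases List.mem_append.mp hz with hz | hz
                  · exact List.mem_append_right _ hz
                  · rcases List.mem_singleton.mp hz with rfl; omega
              have hba2 : b ≤ a2 := hge a2 ha2mem
              have hbb2 : b ≤ b2 := by
                rcases List.mem_append.mp hmemb2 with hz | hz
                · exact hge b2 (List.mem_append_left _ hz)
                · rcases List.mem_append.mp hz with hz | hz
                  · exact hge b2 (List.mem_append_right _ hz)
                  · rcases List.mem_singleton.mp hz with h
                    omega
              omega
            -- a + 2*b < b
            have hvb : a + 2 * b < b := by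
              by_contra hge2
              have hbb2 : b ≤ b2 := by
                rcases List.mem_append.mp hmemb2 with hz | hz
                · exact hge b2 (List.mem_append_left _ hz)
                · rcases List.mem_append.mp hz with hz | hz
                  · exact hge b2 (List.mem_append_right _ hz)
                  · rcases List.mem_singleton.mp hz with h
                    omega
              omega
            -- so s2 is empty
            have hs2nil : s2 = [] := by
              rw [List.eq_nil_iff_forall_not_mem]
              intro w0 hw0
              have h1 := hkey1 w0 hw0
              have h2 := hge w0 (List.mem_append_right _ hw0)
              omega
            rw [hs2nil] at hw ⊢
            simp only [List.nil_append] at hw ⊢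
            rcases List.mem_singleton.mp hw with rfl
            refine ⟨by simp, by omega, ?_⟩
            intro x hx
            have := hge x (List.mem_append_left _ hx)
            omega
        -- lengths for the induction hypothesis
        have hlen3 : (((l.erase a).erase b) ++ [a + b * 2]).length ≤ n := by
          have hmema : a ∈ l := by
            have := PySem.List.min?_mem hmin
            simpa using this
          have e1 : (l.erase a).length = l.length - 1 := List.length_erase_of_mem hmema
          have hmemb : b ∈ l.erase a := by
            have := PySem.List.min?_mem hmin1
            simpa using this
          have e2 : ((l.erase a).erase b).length = (l.erase a).length - 1 :=
            List.length_erase_of_mem hmemb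
          simp only [List.length_append, List.length_cons, List.length_nil]
          omega
        have hp3 : (((l.erase a).erase b) ++ [a + b * 2]).Perm (s1 ++ (s2 ++ [a + 2 * b])) := by
          have hv : a + b * 2 = a + 2 * b := by ring
          rw [hv, ← List.append_assoc]
          exact hp2.append_right [a + 2 * b]
        have hrec := ih _ s1 (s2 ++ [a + 2 * b]) K (cnt + 1) hlen3 hp3 hss1 hsn2 hinv'
        rw [loopA, loopB]
        rw [dif_pos (by exact ⟨h2, by rw [hmin]; simpa using hK⟩)]
        rw [dif_pos (by exact ⟨by omega, hK⟩)]
        simp only [hmin, Option.getD_some] at hmin1 ⊢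
        simp only [hmin1, Option.getD_some]
        exact hrec
      · -- both loops stop
        rw [loopA, loopB]
        rw [dif_neg (by intro hc; rw [hmin] at hc; exact hK (by simpa using hc.2))]
        rw [dif_neg (by intro hc; exact hK hc.2)]
        exact ⟨rfl, hp⟩
    · -- fewer than two elements: both loops stop
      rw [loopA, loopB]
      rw [dif_neg (by omega), dif_neg (by omega)]
      exact ⟨rfl, hp⟩

theorem all_congr_perm (l s : List Int) (K : Int) (hp : l.Perm s) :
    l.all (fun num => decide (K ≤ num)) = s.all (fun num => decide (K ≤ num)) := by
  cases h : s.all (fun num => decide (K ≤ num)) with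
  | true =>
    rw [List.all_eq_true] at h ⊢
    intro x hx; exact h x (hp.mem_iff.mp hx)
  | false =>
    rw [List.all_eq_false] at h ⊢
    obtain ⟨x, hx, hfx⟩ := h
    exact ⟨x, hp.mem_iff.mpr hx, hfx⟩

-- ===== VERDICT (by name: the statement is the Claim_ definition above) =====
theorem solution_spec : Claim_equal_solution := by
  intro scoville K _
  unfold Spec_solution solution solution_alt
  have hp : scoville.Perm ((PySem.List.sorted scoville (fun x => x) false) ++ []) := by
    rw [List.append_nil]
    exact (PySem.List.sorted_perm scoville (fun x => x) false).symm
  have hs : (PySem.List.sorted scoville (fun x => x) false).Pairwise (· ≤ ·) := by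
    have := PySem.List.sorted_pairwise scoville (fun x => x)
    simpa using this
  have hinv : InvB (PySem.List.sorted scoville (fun x => x) false) [] := by
    intro a b _ _ w hw
    simp at hw
  obtain ⟨hcnt, hperm⟩ := loop_agree scoville.length scoville _ [] K 0 (le_refl _) hp hs
    (by simp) hinv
  rw [all_congr_perm _ _ K hperm, hcnt]
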